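-- pv_equiv track=rewrite | github.com/RalfCortes/cluster_based_anomaly | evaluation.py | find_anomaly_ranges
-- ===== SOURCE A (Python) =====
-- def find_anomaly_ranges(labels):
--     ranges = []
--     start = None
--     for i, label in enumerate(labels):
--         if label == 0 and start is not None:
--             ranges.append([start, i - 1])
--             start = None
--         elif label == 1 and start is None:
--             start = i
--     if start is not None:
--         ranges.append([start, len(labels) - 1])
--     return ranges
-- ===== SOURCE B (Python) =====
-- def find_anomaly_ranges(labels):
--     # Pass 1: boolean mask of "inside an anomaly run" after each label.
--     mask = []
--     in_run = False
--     for label in labels: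
--         if label == 1:
--             in_run = True
--         elif label == 0:
--             in_run = False
--         mask.append(in_run)
--     # Pass 2: emit maximal contiguous True runs of the mask.
--     ranges = []
--     i = 0
--     n = len(mask)
--     while i < n:
--         if mask[i]:
--             j = i
--             while j + 1 < n and mask[j + 1]:
--                 j += 1
--             ranges.append([i, j])
--             i = j + 1
--         else:
--             i += 1
--     return ranges
-- ===== Notes on version B (the rewrite author's own statement) =====
-- stated objective: alternative
-- what changed: Replaces the single stateful scan that appends ranges on the fly with two differently shaped passes: first build a boolean in-run mask (1 opens, 0 closes, other values leave it), then extract maximal contiguous True runs of the mask as [start, end] pairs.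
import Mathlib
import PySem

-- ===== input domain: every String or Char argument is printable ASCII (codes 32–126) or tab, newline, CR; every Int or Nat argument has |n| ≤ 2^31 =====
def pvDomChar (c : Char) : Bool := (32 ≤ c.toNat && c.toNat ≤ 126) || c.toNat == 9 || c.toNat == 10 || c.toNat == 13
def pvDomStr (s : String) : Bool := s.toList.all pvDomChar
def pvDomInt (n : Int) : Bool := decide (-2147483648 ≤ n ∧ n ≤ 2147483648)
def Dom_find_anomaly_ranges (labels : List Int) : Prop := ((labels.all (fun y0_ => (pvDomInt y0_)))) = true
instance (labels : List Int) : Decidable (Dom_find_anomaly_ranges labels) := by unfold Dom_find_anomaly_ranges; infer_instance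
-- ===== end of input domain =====

-- B replaces A's single stateful scan with two passes: a boolean in-run mask, then
-- extraction of maximal contiguous True runs (alternative decomposition, same cost).

-- ===== PORT A =====
-- the for-loop of A: state = (ranges, start); i is the running index
def pvLoopA : List Int → Int → List (List Int) → Option Int → List (List Int) × Option Int
  | [], _, ranges, start => (ranges, start)
  | label :: rest, i, ranges, start =>
      match start with
      | some s =>
          if label = 0 then pvLoopA rest (i + 1) (ranges ++ [[s, i - 1]]) none
          else pvLoopA rest (i + 1) ranges (some s)
      | none =>
          if label = 1 then pvLoopA rest (i + 1) ranges (some i)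
          else pvLoopA rest (i + 1) ranges none

-- the trailing "if start is not None" append after the loop
def pvFinalA (st : List (List Int) × Option Int) (n : Int) : List (List Int) :=
  match st.2 with
  | some s => st.1 ++ [[s, n - 1]]
  | none => st.1

def find_anomaly_ranges (labels : List Int) : List (List Int) :=
  pvFinalA (pvLoopA labels 0 [] none) (labels.length : Int)

-- ===== PORT B =====
-- pass 1: the in-run mask
def pvMaskOf : List Int → Bool → List Bool
  | [], _ => []
  | l :: rest, s =>
      let s' := if l = 1 then true else if l = 0 then false else s
      s' :: pvMaskOf rest s'

-- inner while of pass 2: advance j while the next mask entry is True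
def pvTakeRun : List Bool → Int → Int × List Bool
  | true :: m, j => pvTakeRun m (j + 1)
  | m, j => (j, m)

theorem pvTakeRun_len : ∀ (m : List Bool) (j : Int), (pvTakeRun m j).2.length ≤ m.length := by
  intro m
  induction m with
  | nil => intro j; simp [pvTakeRun]
  | cons b m ih =>
      intro j
      cases b with
      | true => exact Nat.le_trans (ih (j + 1)) (Nat.le_succ _)
      | false => simp [pvTakeRun]

-- outer while of pass 2
def pvExtract : List Bool → Int → List (List Int)
  | [], _ => []
  | false :: m, i => pvExtract m (i + 1)
  | true :: m, i =>
      let p := pvTakeRun m i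
      [i, p.1] :: pvExtract p.2 (p.1 + 1)
termination_by m _ => m.length
decreasing_by
  · simp
  · simp only [List.length_cons]
    exact Nat.lt_succ_of_le (pvTakeRun_len m i)

def find_anomaly_ranges_alt (labels : List Int) : List (List Int) :=
  pvExtract (pvMaskOf labels false) 0

-- ===== PRECONDITION & SPEC =====
def Spec_find_anomaly_ranges (labels : List Int) (out : List (List Int)) : Prop := out = find_anomaly_ranges_alt labels
instance (labels : List Int) (out : List (List Int)) : Decidable (Spec_find_anomaly_ranges labels out) := by unfold Spec_find_anomaly_ranges; infer_instance

-- ===== CLAIM (what is proved, stated in full; the proofs are below) =====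
def Claim_equal_find_anomaly_ranges : Prop := ∀ (labels : List Int), Dom_find_anomaly_ranges labels → Spec_find_anomaly_ranges labels (find_anomaly_ranges labels)

-- ===== LEMMAS AND PROOFS =====

theorem pvExtract_nil (i : Int) : pvExtract [] i = [] := by simp [pvExtract]

theorem pvExtract_false (m : List Bool) (i : Int) :
    pvExtract (false :: m) i = pvExtract m (i + 1) := by simp [pvExtract]

theorem pvExtract_cons_true (m : List Bool) (i : Int) :
    pvExtract (true :: m) i =
      [i, (pvTakeRun m i).1] :: pvExtract (pvTakeRun m i).2 ((pvTakeRun m i).1 + 1) := by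
  rw [pvExtract]

-- proof-side description of pvExtract while inside a run that started at s, cursor at i
def pvInRun : List Bool → Int → Int → List (List Int)
  | [], s, i => [[s, i - 1]]
  | true :: m, s, i => pvInRun m s (i + 1)
  | false :: m, s, i => [s, i - 1] :: pvExtract m (i + 1)

theorem pvRun_eq : ∀ (m : List Bool) (s i : Int),
    [s, (pvTakeRun m i).1] :: pvExtract (pvTakeRun m i).2 ((pvTakeRun m i).1 + 1) =
      pvInRun m s (i + 1) := by
  intro m
  induction m with
  | nil => intro s i; simp [pvTakeRun, pvExtract_nil, pvInRun]
  | cons b m ih =>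
      intro s i
      cases b with
      | true =>
          have h : pvTakeRun (true :: m) i = pvTakeRun m (i + 1) := by simp [pvTakeRun]
          rw [h, ih s (i + 1)]
          simp [pvInRun]
      | false =>
          simp [pvTakeRun, pvInRun, pvExtract_false]

theorem pvExtract_true (m : List Bool) (i : Int) :
    pvExtract (true :: m) i = pvInRun m i (i + 1) := by
  rw [pvExtract_cons_true, pvRun_eq]

theorem pvMain : ∀ (rest : List Int) (i : Int) (ranges : List (List Int)) (st : Option Int),
    pvFinalA (pvLoopA rest i ranges st) (i + (rest.length : Int)) =
      ranges ++ (match st with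
        | none => pvExtract (pvMaskOf rest false) i
        | some s => pvInRun (pvMaskOf rest true) s i) := by
  intro rest
  induction rest with
  | nil =>
      intro i ranges st
      cases st with
      | none => simp [pvLoopA, pvFinalA, pvMaskOf, pvExtract_nil]
      | some s => simp [pvLoopA, pvFinalA, pvMaskOf, pvInRun]
  | cons l r ih =>
      intro i ranges st
      have hlen : i + ((l :: r).length : Int) = (i + 1) + (r.length : Int) := by
        simp; omega
      cases st with
      | some s =>
          by_cases h0 : l = 0
          · have h : pvLoopA (l :: r) i ranges (some s) =
                pvLoopA r (i + 1) (ranges ++ [[s, i - 1]]) none := by simp [pvLoopA, h0]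
            rw [h, hlen, ih]
            simp [pvMaskOf, h0, pvInRun]
          · have h : pvLoopA (l :: r) i ranges (some s) = pvLoopA r (i + 1) ranges (some s) := by
              simp [pvLoopA, h0]
            rw [h, hlen, ih]
            by_cases h1 : l = 1 <;> simp [pvMaskOf, h0, h1, pvInRun]
      | none =>
          by_cases h1 : l = 1
          · have h : pvLoopA (l :: r) i ranges none = pvLoopA r (i + 1) ranges (some i) := by
              simp [pvLoopA, h1]
            rw [h, hlen, ih]
            simp [pvMaskOf, h1, pvExtract_true]
          · have h : pvLoopA (l :: r) i ranges none = pvLoopA r (i + 1) ranges none := by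
              simp [pvLoopA, h1]
            rw [h, hlen, ih]
            by_cases h0 : l = 0 <;> simp [pvMaskOf, h0, h1, pvExtract_false]

-- ===== VERDICT (by name: the statement is the Claim_ definition above) =====
theorem find_anomaly_ranges_spec : Claim_equal_find_anomaly_ranges := by
  intro labels _
  unfold Spec_find_anomaly_ranges find_anomaly_ranges find_anomaly_ranges_alt
  have h := pvMain labels 0 [] none
  simpa using h
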